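-- pv_equiv track=rewrite | github.com/incenger/dsa_practice | aoc/2021/18.py | split_snailfish
-- ===== SOURCE A (Python) =====
-- import math
--
-- def split_snailfish(sf):
--     numbers, depths = sf
--     split_idx = -1
--     for i, x in enumerate(numbers):
--         if x >= 10:
--             split_idx = i
--             break
--     if split_idx == -1:
--         return sf, False
--
--     new_pair = [
--         math.floor(numbers[split_idx] / 2),
--         math.ceil(numbers[split_idx] / 2),
--     ]
--     new_numbers = numbers[:split_idx] + new_pair + numbers[split_idx + 1 :]
--     new_depth = 1 + max(
--         depths[split_idx - 1] if split_idx > 0 else 0,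
--         depths[split_idx] if split_idx < len(depths) else 0,
--     )
--     new_depths = depths[:split_idx] + [new_depth] + depths[split_idx:]
--     return (new_numbers, new_depths), True
-- ===== SOURCE B (Python) =====
-- def split_snailfish(sf):
--     numbers, depths = sf
--     new_numbers = []
--     new_depths = []
--     found = False
--     for i, x in enumerate(numbers):
--         if not found and x >= 10:
--             new_numbers.append(x // 2)
--             new_numbers.append(-(-x // 2))
--             left = depths[i - 1] if i > 0 else 0
--             right = depths[i] if i < len(depths) else 0
--             new_depths.append(1 + max(left, right))
--             if i < len(depths):
--                 new_depths.append(depths[i])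
--             found = True
--         else:
--             new_numbers.append(x)
--             if i < len(depths):
--                 new_depths.append(depths[i])
--     if not found:
--         return sf, False
--     new_depths.extend(depths[len(numbers):])
--     return (new_numbers, new_depths), True
-- ===== Notes on version B (the rewrite author's own statement) =====
-- stated objective: alternative
-- what changed: Replaced A's locate-index-then-slice (find split index, then rebuild via three slice concatenations for numbers and depths) with a single forward pass that builds new_numbers and new_depths together under a 'found' flag, splicing in the [floor, ceil] pair and the computed depth inline at the first element >= 10.
import Mathlib
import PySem

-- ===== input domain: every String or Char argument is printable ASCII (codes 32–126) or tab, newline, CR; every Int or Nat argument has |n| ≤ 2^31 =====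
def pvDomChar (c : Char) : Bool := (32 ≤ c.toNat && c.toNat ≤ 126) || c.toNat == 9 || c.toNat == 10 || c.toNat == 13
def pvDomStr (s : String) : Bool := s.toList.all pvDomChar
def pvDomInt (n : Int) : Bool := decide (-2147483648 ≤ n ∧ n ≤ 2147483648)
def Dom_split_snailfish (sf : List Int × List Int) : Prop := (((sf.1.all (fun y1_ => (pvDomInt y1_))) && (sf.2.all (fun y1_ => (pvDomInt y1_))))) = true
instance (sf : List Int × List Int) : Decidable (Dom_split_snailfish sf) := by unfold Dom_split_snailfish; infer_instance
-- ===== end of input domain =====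

-- B rebuilds both lists in one forward pass with a 'found' flag instead of A's locate-then-slice; same cost, different decomposition.

-- ===== PORT A =====
-- the 'for i, x in enumerate(numbers): if x >= 10: split_idx = i; break' loop
def pvFindSplit : List Int → Int → Int
  | [], _ => -1
  | x :: xs, i => if 10 ≤ x then i else pvFindSplit xs (i + 1)

-- math.floor(v/2) / math.ceil(v/2) are exact floor/ceiling division for |v| ≤ 2^31 (float division is exact there).
-- depths[split_idx-1] is ported with pyGetD (default 0): Python raises IndexError exactly when it is out of range,
-- and Pre_split_snailfish excludes those inputs.
def split_snailfish (sf : List Int × List Int) : (List Int × List Int) × Bool :=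
  let numbers := sf.1
  let depths := sf.2
  let split_idx := pvFindSplit numbers 0
  if split_idx = -1 then (sf, false)
  else
    let v := PySem.List.pyGetD numbers split_idx 0
    let new_pair := [PySem.Int.floordiv v 2, -(PySem.Int.floordiv (-v) 2)]
    let new_numbers := PySem.List.slice numbers none (some split_idx) ++ new_pair
      ++ PySem.List.slice numbers (some (split_idx + 1)) none
    let new_depth := 1 + max
      (if 0 < split_idx then PySem.List.pyGetD depths (split_idx - 1) 0 else 0)
      (if split_idx < (depths.length : Int) then PySem.List.pyGetD depths split_idx 0 else 0)
    let new_depths := PySem.List.slice depths none (some split_idx) ++ [new_depth]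
      ++ PySem.List.slice depths (some split_idx) none
    ((new_numbers, new_depths), true)

-- ===== PORT B =====
-- one forward pass over numbers (index i, 'found' flag), building new_numbers and new_depths together;
-- depths[i-1] is ported with getD 0 (Python raises there; excluded by Pre_split_snailfish)
def pvAltGo (depths : List Int) : List Int → Nat → Bool → List Int × List Int × Bool
  | [], _, found => ([], [], found)
  | x :: xs, i, found =>
    if !found && 10 ≤ x then
      let r := pvAltGo depths xs (i + 1) true
      ((PySem.Int.floordiv x 2) :: (-(PySem.Int.floordiv (-x) 2)) :: r.1,
       (1 + max (if 0 < i then depths.getD (i - 1) 0 else 0)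
                (if i < depths.length then depths.getD i 0 else 0))
         :: ((if i < depths.length then [depths.getD i 0] else []) ++ r.2.1),
       r.2.2)
    else
      let r := pvAltGo depths xs (i + 1) found
      (x :: r.1, (if i < depths.length then [depths.getD i 0] else []) ++ r.2.1, r.2.2)

def split_snailfish_alt (sf : List Int × List Int) : (List Int × List Int) × Bool :=
  let numbers := sf.1
  let depths := sf.2
  let r := pvAltGo depths numbers 0 false
  if r.2.2 = false then (sf, false)
  else ((r.1, r.2.1 ++ depths.drop numbers.length), true)

-- ===== PRECONDITION & SPEC =====
-- Pre_ excludes exactly the inputs where Python raises IndexError (both A and B do): the first element ≥ 10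
-- sits at an index i > 0 with i - 1 ≥ len(depths), so depths[i-1] is out of range.
def Pre_split_snailfish (sf : List Int × List Int) : Prop :=
  ∀ i, i < sf.1.length →
    (10 ≤ sf.1.getD i 0 ∧ ∀ j, j < i → sf.1.getD j 0 < 10) → (i = 0 ∨ i ≤ sf.2.length)
instance (sf : List Int × List Int) : Decidable (Pre_split_snailfish sf) := by
  unfold Pre_split_snailfish; infer_instance

def pvWitness_split_snailfish : (List Int × List Int) := ([3, 12, 4], [2, 2, 2])

def Spec_split_snailfish (sf : List Int × List Int) (out : (List Int × List Int) × Bool) : Prop := out = split_snailfish_alt sf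
instance (sf : List Int × List Int) (out : (List Int × List Int) × Bool) : Decidable (Spec_split_snailfish sf out) := by unfold Spec_split_snailfish; infer_instance

-- ===== CLAIM (what is proved, stated in full; the proofs are below) =====
def Claim_equal_split_snailfish : Prop := ∀ (sf : List Int × List Int), Dom_split_snailfish sf → Pre_split_snailfish sf → Spec_split_snailfish sf (split_snailfish sf)

-- ===== LEMMAS AND PROOFS =====

-- every list either is all < 10 or splits at its first element ≥ 10
theorem pvDecomp (ns : List Int) :
    (∀ x ∈ ns, x < 10) ∨ ∃ p x q, ns = p ++ x :: q ∧ (∀ y ∈ p, y < 10) ∧ 10 ≤ x := by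
  induction ns with
  | nil => left; simp
  | cons a t ih =>
    by_cases ha : 10 ≤ a
    · right; exact ⟨[], a, t, by simp, by simp, ha⟩
    · rcases ih with h | ⟨p, x, q, rfl, hp, hx⟩
      · left; intro y hy
        rcases List.mem_cons.1 hy with rfl | hy
        · omega
        · exact h y hy
      · right
        refine ⟨a :: p, x, q, by simp, ?_, hx⟩
        intro y hy
        rcases List.mem_cons.1 hy with rfl | hy
        · omega
        · exact hp y hy

theorem pvFindSplit_neg (ns : List Int) (c : Int) (h : ∀ x ∈ ns, x < 10) :
    pvFindSplit ns c = -1 := by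
  induction ns generalizing c with
  | nil => rfl
  | cons a t ih =>
    have ha : ¬ (10 ≤ a) := by have := h a (by simp); omega
    simp [pvFindSplit, ha]
    exact ih _ (fun x hx => h x (by simp [hx]))

theorem pvFindSplit_pos (p : List Int) (x : Int) (q : List Int) (c : Int)
    (hp : ∀ y ∈ p, y < 10) (hx : 10 ≤ x) :
    pvFindSplit (p ++ x :: q) c = c + p.length := by
  induction p generalizing c with
  | nil => simp [pvFindSplit, hx]
  | cons a t ih =>
    have ha : ¬ (10 ≤ a) := by have := hp a (by simp); omega
    simp only [List.cons_append, pvFindSplit, ha, if_false]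
    rw [ih _ (fun y hy => hp y (by simp [hy]))]
    simp only [List.length_cons]
    push_cast
    omega

-- the depth item emitted at position i followed by the segment from i+1 is the segment from i
theorem pvSeg (D : List Int) (i m : Nat) :
    (if i < D.length then [D[i]?.getD 0] else []) ++ (D.drop (i + 1)).take m
      = (D.drop i).take (m + 1) := by
  by_cases h : i < D.length
  · simp only [if_pos h, List.getElem?_eq_getElem h, Option.getD_some]
    rw [← List.getElem_cons_drop h, List.take_succ_cons]
    simp
  · have h1 : D.drop i = [] := List.drop_eq_nil_of_le (by omega)
    have h2 : D.drop (i + 1) = [] := List.drop_eq_nil_of_le (by omega)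
    simp [h, h1, h2]

theorem pvGo_found (D : List Int) (ns : List Int) (i : Nat) :
    pvAltGo D ns i true = (ns, (D.drop i).take ns.length, true) := by
  induction ns generalizing i with
  | nil => simp [pvAltGo]
  | cons a t ih =>
    simp only [pvAltGo, Bool.not_true, Bool.false_and]
    rw [ih (i + 1)]
    simp [pvSeg]

theorem pvGo_nosplit (D : List Int) (ns : List Int) (i : Nat) (h : ∀ x ∈ ns, x < 10) :
    pvAltGo D ns i false = (ns, (D.drop i).take ns.length, false) := by
  induction ns generalizing i with
  | nil => simp [pvAltGo]
  | cons a t ih =>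
    have ha : ¬ (10 ≤ a) := by have := h a (by simp); omega
    simp only [pvAltGo, Bool.not_false, Bool.true_and]
    rw [ih (i + 1) (fun x hx => h x (by simp [hx]))]
    simp [ha, pvSeg]

theorem pvGo_split (D : List Int) (p : List Int) (x : Int) (q : List Int) (i : Nat)
    (hp : ∀ y ∈ p, y < 10) (hx : 10 ≤ x) :
    pvAltGo D (p ++ x :: q) i false =
      (p ++ (PySem.Int.floordiv x 2) :: (-(PySem.Int.floordiv (-x) 2)) :: q,
       (D.drop i).take p.length
         ++ (1 + max (if 0 < i + p.length then D.getD (i + p.length - 1) 0 else 0)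
                     (if i + p.length < D.length then D.getD (i + p.length) 0 else 0))
         :: (D.drop (i + p.length)).take (q.length + 1),
       true) := by
  induction p generalizing i with
  | nil =>
    simp only [List.nil_append, pvAltGo, Bool.not_false, Bool.true_and]
    rw [pvGo_found D q (i + 1)]
    simp [hx, pvSeg]
  | cons a t ih =>
    have ha : ¬ (10 ≤ a) := by have := hp a (by simp); omega
    simp only [List.cons_append, pvAltGo, Bool.not_false, Bool.true_and]
    rw [ih (i + 1) (fun y hy => hp y (by simp [hy]))]
    have harith : i + 1 + t.length = i + (t.length + 1) := by omega
    rw [harith]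
    simp only [List.length_cons]
    simp [ha, ← List.append_assoc, pvSeg]

-- ===== VERDICT (by name: the statement is the Claim_ definition above) =====
theorem split_snailfish_spec : Claim_equal_split_snailfish := by
  intro sf _hdom hpre
  unfold Spec_split_snailfish
  obtain ⟨ns, D⟩ := sf
  rcases pvDecomp ns with h | ⟨p, x, q, rfl, hp, hx⟩
  · -- no element ≥ 10: both return (sf, false)
    simp only [split_snailfish, split_snailfish_alt]
    rw [pvFindSplit_neg ns 0 h, pvGo_nosplit D ns 0 h]
    simp
  · -- first element ≥ 10 at index p.length
    have hfind : pvFindSplit (p ++ x :: q) 0 = (p.length : Int) := by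
      rw [pvFindSplit_pos p x q 0 hp hx]; ring
    simp only [split_snailfish, split_snailfish_alt]
    rw [hfind, pvGo_split D p x q 0 hp hx]
    have hne : ((p.length : Int)) ≠ -1 := by omega
    rw [if_neg hne]
    have hget : PySem.List.pyGetD (p ++ x :: q) (p.length : Int) 0 = x := by
      rw [PySem.List.pyGetD_natCast]
      rw [List.getD_eq_getElem?_getD, List.getElem?_append_right (by omega)]
      simp
    have hslice1 : PySem.List.slice (p ++ x :: q) none (some (p.length : Int)) = p := by
      rw [PySem.List.slice_to_natCast]; simp
    have hslice2 : PySem.List.slice (p ++ x :: q) (some ((p.length : Int) + 1)) none = q := by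
      have h1 : ((p.length : Int) + 1) = (((p.length + 1 : Nat)) : Int) := by push_cast; ring
      rw [h1, PySem.List.slice_from_natCast]
      rw [show p ++ x :: q = (p ++ [x]) ++ q by simp]
      rw [List.drop_left' (by simp)]
    have hsliceD1 : PySem.List.slice D none (some (p.length : Int)) = D.take p.length :=
      PySem.List.slice_to_natCast D p.length
    have hsliceD2 : PySem.List.slice D (some (p.length : Int)) none = D.drop p.length :=
      PySem.List.slice_from_natCast D p.length
    have hdepthL : (if 0 < (p.length : Int) then PySem.List.pyGetD D ((p.length : Int) - 1) 0 else 0)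
        = (if 0 < p.length then D.getD (p.length - 1) 0 else 0) := by
      by_cases hk : 0 < p.length
      · have h1 : ((p.length : Int) - 1) = (((p.length - 1 : Nat)) : Int) := by omega
        rw [if_pos (by exact_mod_cast hk), if_pos hk, h1, PySem.List.pyGetD_natCast]
      · rw [if_neg (by exact_mod_cast hk), if_neg hk]
    have hdepthR : (if (p.length : Int) < (D.length : Int) then PySem.List.pyGetD D (p.length : Int) 0 else 0)
        = (if p.length < D.length then D.getD p.length 0 else 0) := by
      by_cases hk : p.length < D.length
      · rw [if_pos (by exact_mod_cast hk), if_pos hk, PySem.List.pyGetD_natCast]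
      · rw [if_neg (by exact_mod_cast hk), if_neg hk]
    have hlen : (p ++ x :: q).length = p.length + (q.length + 1) := by simp
    have htail : (D.drop p.length).take (q.length + 1) ++ D.drop ((p ++ x :: q).length)
        = D.drop p.length := by
      rw [hlen, ← List.drop_drop]
      exact List.take_append_drop _ _
    simp only [Nat.zero_add, List.drop_zero, hget, hslice1, hslice2, hsliceD1, hsliceD2,
      hdepthL, hdepthR]
    rw [← htail]
    simp
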